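-- pv_equiv track=rewrite | github.com/MajliMaster/zajecia-dla-osmoklasistow | programowanie i podstawy algorytmiki/VI zajecia/python/spa.py | dlugosc
-- ===== SOURCE A (Python) =====
-- def dlugosc(a, b):
--     wynik = 0
--     while a != b:
--         if a > b:
--             a //= 2
--         else:
--             b //= 2
--         wynik += 1
--     return wynik
-- ===== SOURCE B (Python) =====
-- def dlugosc(a, b):
--     # Two-phase heap-LCA distance: align depths by bit-length, then climb both together.
--     la = a.bit_length()
--     lb = b.bit_length()
--     steps = abs(la - lb)
--     if la > lb:
--         a >>= la - lb
--     else: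
--         b >>= lb - la
--     while a != b:
--         a >>= 1
--         b >>= 1
--         steps += 2
--     return steps
-- ===== Notes on version B (the rewrite author's own statement) =====
-- stated objective: alternative
-- what changed: Replaces the one-at-a-time halve-the-larger loop with a two-phase heap-LCA computation: align the deeper node by a single bit-length-difference shift, then climb both nodes together adding 2 per level.
-- outside the precondition, e.g. on dlugosc(-3, -3): A returns 0, B returns 0
import Mathlib
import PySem

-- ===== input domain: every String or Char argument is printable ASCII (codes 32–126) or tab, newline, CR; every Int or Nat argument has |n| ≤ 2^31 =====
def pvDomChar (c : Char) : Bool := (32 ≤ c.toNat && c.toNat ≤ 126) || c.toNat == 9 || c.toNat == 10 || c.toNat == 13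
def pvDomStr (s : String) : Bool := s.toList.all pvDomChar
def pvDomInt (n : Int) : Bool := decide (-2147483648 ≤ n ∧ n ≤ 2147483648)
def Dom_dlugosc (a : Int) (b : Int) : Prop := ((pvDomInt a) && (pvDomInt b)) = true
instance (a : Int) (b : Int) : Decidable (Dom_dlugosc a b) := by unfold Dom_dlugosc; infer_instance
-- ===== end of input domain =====

-- B replaces A's halve-the-larger loop by bit-length depth alignment plus a joint climb (heap-LCA style); return-value equivalence on nonnegative inputs.

-- ===== PORT A =====
-- A's while loop as fuel recursion; on Pre_ inputs each iteration halves the larger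
-- (positive) operand, so natAbs a + natAbs b iterations always suffice (the fuel is
-- only a totality guard, never reached on admitted inputs).
def dlugoscGo : Nat → Int → Int → Int → Int
  | 0, _, _, wynik => wynik
  | f + 1, a, b, wynik =>
      if a = b then wynik
      else if a > b then dlugoscGo f (PySem.Int.floordiv a 2) b (wynik + 1)
      else dlugoscGo f a (PySem.Int.floordiv b 2) (wynik + 1)

def dlugosc (a : Int) (b : Int) : Int := dlugoscGo (a.natAbs + b.natAbs) a b 0

-- ===== PORT B =====
-- B's while loop as fuel recursion; after alignment both values have bitLength
-- min la lb, which drops by one per iteration, so min la lb + 1 iterations suffice.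
def dlugoscAltGo : Nat → Nat → Nat → Int → Int
  | 0, _, _, steps => steps
  | f + 1, a, b, steps =>
      if a = b then steps else dlugoscAltGo f (a >>> 1) (b >>> 1) (steps + 2)

def dlugosc_alt (a : Int) (b : Int) : Int :=
  let la := PySem.Int.bitLength a
  let lb := PySem.Int.bitLength b
  let steps : Int := ((max la lb - min la lb : Nat) : Int)  -- abs(la - lb)
  -- Python's a >>= la - lb / b >>= lb - la on nonnegative ints; Nat subtraction
  -- gives 0 on the branch that does not shift, matching the if/else.
  let an := a.toNat >>> (la - lb)
  let bn := b.toNat >>> (lb - la)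
  dlugoscAltGo (min la lb + 1) an bn steps

-- ===== PRECONDITION & SPEC =====
-- Pre_ excludes negative inputs: there A's floor-halving loop generally fails to
-- terminate (it returns only when a == b already, trivially giving 0).
def Pre_dlugosc (a : Int) (b : Int) : Prop := 0 ≤ a ∧ 0 ≤ b
instance (a : Int) (b : Int) : Decidable (Pre_dlugosc a b) := by unfold Pre_dlugosc; infer_instance
def pvWitness_dlugosc : Int × Int := (6, 5)

def Spec_dlugosc (a : Int) (b : Int) (out : Int) : Prop := out = dlugosc_alt a b
instance (a : Int) (b : Int) (out : Int) : Decidable (Spec_dlugosc a b out) := by unfold Spec_dlugosc; infer_instance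

-- ===== CLAIM (what is proved, stated in full; the proofs are below) =====
def Claim_equal_dlugosc : Prop := ∀ (a : Int) (b : Int), Dom_dlugosc a b → Pre_dlugosc a b → Spec_dlugosc a b (dlugosc a b)

-- ===== LEMMAS AND PROOFS =====

-- Reference recursion: the number of halve-the-larger steps, on Nat.
def pvRef (a b : Nat) : Nat :=
  if a = b then 0
  else if b < a then pvRef (a / 2) b + 1
  else pvRef a (b / 2) + 1
termination_by a + b
decreasing_by
  · have ha : 0 < a := by omega
    have := Nat.div_lt_self ha (by norm_num : 1 < 2)
    omega
  · have hb : 0 < b := by omega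
    have := Nat.div_lt_self hb (by norm_num : 1 < 2)
    omega

def pvBl (n : Nat) : Nat := PySem.Int.bitLength (n : Int)

theorem pvBl_zero : pvBl 0 = 0 := by decide

theorem pvBl_succ {n : Nat} (h : 0 < n) : pvBl n = pvBl (n / 2) + 1 := by
  simpa [pvBl] using PySem.Int.bitLength_natCast (m := n) h

theorem pvBl_eq_zero {n : Nat} (h : pvBl n = 0) : n = 0 := by
  by_contra hn
  have := pvBl_succ (n := n) (by omega)
  omega

theorem pvBl_lt : ∀ n : Nat, n < 2 ^ pvBl n := by
  intro n
  have := PySem.Int.lt_two_pow_bitLength (n : Int)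
  simpa [pvBl] using this

theorem pvBl_le {n : Nat} (h : n ≠ 0) : 2 ^ (pvBl n - 1) ≤ n := by
  have := PySem.Int.two_pow_bitLength_le (n := (n : Int)) (by exact_mod_cast h)
  simpa [pvBl] using this

theorem pvBl_lt_imp {a b : Nat} (h : pvBl a < pvBl b) : a < b := by
  have hb0 : b ≠ 0 := by
    intro hb; subst hb; simp [pvBl_zero] at h
  calc a < 2 ^ pvBl a := pvBl_lt a
    _ ≤ 2 ^ (pvBl b - 1) := Nat.pow_le_pow_right (by norm_num) (by omega)
    _ ≤ b := pvBl_le hb0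

theorem pvBl_div_pow : ∀ (d a : Nat), d ≤ pvBl a → pvBl (a / 2 ^ d) = pvBl a - d := by
  intro d
  induction d with
  | zero => intro a _; simp
  | succ d ih =>
    intro a hd
    have ha0 : a ≠ 0 := by
      intro h; subst h; simp [pvBl_zero] at hd
    have hIH : pvBl (a / 2 ^ d) = pvBl a - d := ih a (by omega)
    have hpos : 0 < a / 2 ^ d := by
      have h1 : 2 ^ d ≤ 2 ^ (pvBl a - 1) := Nat.pow_le_pow_right (by norm_num) (by omega)
      have h2 := pvBl_le ha0
      exact Nat.div_pos (le_trans h1 h2) (Nat.pow_pos (by norm_num))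
    have : pvBl (a / 2 ^ d / 2) = pvBl (a / 2 ^ d) - 1 := by
      have := pvBl_succ hpos; omega
    have hdiv : a / 2 ^ (d + 1) = a / 2 ^ d / 2 := by
      rw [Nat.div_div_eq_div_mul, pow_succ]
    rw [hdiv, this, hIH]; omega

-- pvRef unfoldings
theorem pvRef_self (a : Nat) : pvRef a a = 0 := by rw [pvRef]; simp

theorem pvRef_left {a b : Nat} (h : b < a) : pvRef a b = pvRef (a / 2) b + 1 := by
  rw [pvRef]; simp [Nat.ne_of_gt h, h]

theorem pvRef_right {a b : Nat} (h : a < b) : pvRef a b = pvRef a (b / 2) + 1 := by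
  rw [pvRef]; simp [Nat.ne_of_lt h, Nat.lt_asymm h]

-- Phase 1, a deeper: shifting a down by the depth difference = that many single steps.
theorem pvRef_phase1_left : ∀ (d a b : Nat), pvBl b + d = pvBl a →
    pvRef a b = d + pvRef (a / 2 ^ d) b := by
  intro d
  induction d with
  | zero => intro a b _; simp
  | succ d ih =>
    intro a b h
    have hba : b < a := pvBl_lt_imp (by omega)
    have ha0 : 0 < a := by omega
    have hbl : pvBl (a / 2) = pvBl a - 1 := by have := pvBl_succ ha0; omega
    have hrec := ih (a / 2) b (by omega)
    have hdiv : a / 2 / 2 ^ d = a / 2 ^ (d + 1) := by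
      rw [Nat.div_div_eq_div_mul, ← pow_succ']
    rw [pvRef_left hba, hrec, hdiv]; omega

-- Phase 1, b deeper.
theorem pvRef_phase1_right : ∀ (d a b : Nat), pvBl a + d = pvBl b →
    pvRef a b = d + pvRef a (b / 2 ^ d) := by
  intro d
  induction d with
  | zero => intro a b _; simp
  | succ d ih =>
    intro a b h
    have hab : a < b := pvBl_lt_imp (by omega)
    have hb0 : 0 < b := by omega
    have hbl : pvBl (b / 2) = pvBl b - 1 := by have := pvBl_succ hb0; omega
    have hrec := ih a (b / 2) (by omega)
    have hdiv : b / 2 / 2 ^ d = b / 2 ^ (d + 1) := by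
      rw [Nat.div_div_eq_div_mul, ← pow_succ']
    rw [pvRef_right hab, hrec, hdiv]; omega

-- Phase 2: at equal depth two reference steps form one joint climb.
theorem pvRef_phase2 : ∀ (f a b : Nat) (s : Int), pvBl a = pvBl b → pvBl a ≤ f →
    dlugoscAltGo f a b s = s + pvRef a b := by
  intro f
  induction f with
  | zero =>
    intro a b s h hf
    have ha : a = 0 := pvBl_eq_zero (by omega)
    have hb : b = 0 := pvBl_eq_zero (by omega)
    subst ha; subst hb
    simp [dlugoscAltGo, pvRef_self]
  | succ f ih =>
    intro a b s h hf
    by_cases hab : a = b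
    · subst hab; simp [dlugoscAltGo, pvRef_self]
    · have hL : 0 < pvBl a := by
        by_contra hL
        have ha : a = 0 := pvBl_eq_zero (by omega)
        have hb : b = 0 := pvBl_eq_zero (by omega)
        exact hab (by omega)
      have ha0 : 0 < a := by
        by_contra h0
        have : a = 0 := by omega
        subst this; simp [pvBl_zero] at hL
      have hb0 : 0 < b := by
        by_contra h0
        have : b = 0 := by omega
        subst this; rw [h] at hL; simp [pvBl_zero] at hL
      have hba : pvBl (a / 2) = pvBl a - 1 := by have := pvBl_succ ha0; omega
      have hbb : pvBl (b / 2) = pvBl b - 1 := by have := pvBl_succ hb0; omega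
      have hstep : pvRef a b = pvRef (a / 2) (b / 2) + 2 := by
        rcases Nat.lt_or_ge a b with hlt | hge
        · -- a < b : b halved first, then a is the larger
          have h1 := pvRef_right hlt
          have h2 : b / 2 < a := pvBl_lt_imp (by omega)
          have h3 := pvRef_left h2
          omega
        · have hgt : b < a := by omega
          have h1 := pvRef_left hgt
          have h2 : a / 2 < b := pvBl_lt_imp (by omega)
          have h3 := pvRef_right h2
          omega
      have hrec := ih (a / 2) (b / 2) (s + 2) (by omega) (by omega)
      simp only [dlugoscAltGo, if_neg hab, Nat.shiftRight_one]
      rw [hrec, hstep]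
      push_cast; ring
-- A's loop computes pvRef, given enough fuel.
theorem pvGoA : ∀ (f a b : Nat) (w : Int), a + b ≤ f →
    dlugoscGo f (a : Int) (b : Int) w = w + pvRef a b := by
  intro f
  induction f with
  | zero =>
    intro a b w h
    have : a = 0 ∧ b = 0 := by omega
    obtain ⟨ha, hb⟩ := this; subst ha; subst hb
    simp [dlugoscGo, pvRef_self]
  | succ f ih =>
    intro a b w h
    by_cases hab : a = b
    · subst hab; simp [dlugoscGo, pvRef_self]
    · have hne : (a : Int) ≠ (b : Int) := by exact_mod_cast hab
      rcases Nat.lt_or_ge b a with hgt | hle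
      · have hgt' : (a : Int) > (b : Int) := by exact_mod_cast hgt
        have hfd : PySem.Int.floordiv (a : Int) 2 = ((a / 2 : Nat) : Int) := by
          exact_mod_cast PySem.Int.floordiv_natCast a 2
        have hrec := ih (a / 2) b (w + 1)
          (by have := Nat.div_lt_self (by omega : 0 < a) (by norm_num : 1 < 2); omega)
        simp only [dlugoscGo, if_neg hne, if_pos hgt', hfd]
        rw [hrec, pvRef_left hgt]
        push_cast; ring
      · have hlt : a < b := by omega
        have hngt : ¬ (a : Int) > (b : Int) := by exact_mod_cast Nat.not_lt.mpr hle
        have hfd : PySem.Int.floordiv (b : Int) 2 = ((b / 2 : Nat) : Int) := by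
          exact_mod_cast PySem.Int.floordiv_natCast b 2
        have hrec := ih a (b / 2) (w + 1)
          (by have := Nat.div_lt_self (by omega : 0 < b) (by norm_num : 1 < 2); omega)
        simp only [dlugoscGo, if_neg hne, if_neg hngt, hfd]
        rw [hrec, pvRef_right hlt]
        push_cast; ring

-- ===== VERDICT (by name: the statement is the Claim_ definition above) =====
theorem dlugosc_spec : Claim_equal_dlugosc := by
  unfold Claim_equal_dlugosc
  intro a b _ hpre
  obtain ⟨ha, hb⟩ := hpre
  unfold Spec_dlugosc
  set an := a.toNat with han
  set bn := b.toNat with hbn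
  have haI : a = (an : Int) := by omega
  have hbI : b = (bn : Int) := by omega
  have hA : dlugosc a b = ((pvRef an bn : Nat) : Int) := by
    unfold dlugosc
    rw [haI, hbI]
    have : ((an : Int)).natAbs = an := by simp
    have : ((bn : Int)).natAbs = bn := by simp
    simpa using pvGoA (an + bn) an bn 0 (by simp)
  have hla : PySem.Int.bitLength a = pvBl an := by rw [haI]; rfl
  have hlb : PySem.Int.bitLength b = pvBl bn := by rw [hbI]; rfl
  unfold dlugosc_alt
  simp only [hla, hlb, ← han, ← hbn, Nat.shiftRight_eq_div_pow]
  by_cases hcase : pvBl bn ≤ pvBl an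
  · have hmax : max (pvBl an) (pvBl bn) = pvBl an := Nat.max_eq_left hcase
    have hmin : min (pvBl an) (pvBl bn) = pvBl bn := Nat.min_eq_right hcase
    have hzero : pvBl bn - pvBl an = 0 := by omega
    have hblsh : pvBl (an / 2 ^ (pvBl an - pvBl bn)) = pvBl bn :=
      by rw [pvBl_div_pow _ _ (by omega)]; omega
    have h2 := pvRef_phase2 (pvBl bn + 1) (an / 2 ^ (pvBl an - pvBl bn)) bn
      ((((pvBl an) - (pvBl bn) : Nat) : Int)) (by rw [hblsh]) (by omega)
    have h1 := pvRef_phase1_left (pvBl an - pvBl bn) an bn (by omega)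
    rw [hA, hmax, hmin, hzero]
    simp only [pow_zero, Nat.div_one, h2, h1]
    push_cast; ring
  · have hcase' : pvBl an ≤ pvBl bn := by omega
    have hmax : max (pvBl an) (pvBl bn) = pvBl bn := Nat.max_eq_right hcase'
    have hmin : min (pvBl an) (pvBl bn) = pvBl an := Nat.min_eq_left hcase'
    have hzero : pvBl an - pvBl bn = 0 := by omega
    have hblsh : pvBl (bn / 2 ^ (pvBl bn - pvBl an)) = pvBl an :=
      by rw [pvBl_div_pow _ _ (by omega)]; omega
    have h2 := pvRef_phase2 (pvBl an + 1) an (bn / 2 ^ (pvBl bn - pvBl an))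
      ((((pvBl bn) - (pvBl an) : Nat) : Int)) (by rw [hblsh]) (by omega)
    have h1 := pvRef_phase1_right (pvBl bn - pvBl an) an bn (by omega)
    rw [hA, hmax, hmin, hzero]
    simp only [pow_zero, Nat.div_one, h2, h1]
    push_cast; ring
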